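-- pv_equiv track=rewrite | github.com/klenwell/code-challenges | python/advent-of-code/2021/day-15.py | extend_row
-- ===== SOURCE A (Python) =====
-- def extend_row(row):
--     extended_row = []
--
--     for n in range(5):
--         for risk in row:
--             new_risk = (risk + n) % 9
--             if new_risk == 0: new_risk = 9
--             extended_row.append(str(new_risk))
--
--     return ''.join(extended_row)
-- ===== SOURCE B (Python) =====
-- def extend_row(row):
--     # Rolling per-tile state: normalize once, then increment each tile in place.
--     current = [(r - 1) % 9 + 1 for r in row]
--     tiles = []
--     for _ in range(5):
--         tiles.append(''.join(str(c) for c in current))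
--         current = [c % 9 + 1 for c in current]
--     return ''.join(tiles)
-- ===== Notes on version B (the rewrite author's own statement) =====
-- stated objective: alternative
-- what changed: Instead of recomputing each cell as (risk+n)%9 with a 0->9 fix-up inside a double loop over tiles and cells, B normalizes the row once to the 1..9 range and then derives each of the 5 tiles from the previous one by a rolling increment c%9+1, joining one string per tile.
import Mathlib
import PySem

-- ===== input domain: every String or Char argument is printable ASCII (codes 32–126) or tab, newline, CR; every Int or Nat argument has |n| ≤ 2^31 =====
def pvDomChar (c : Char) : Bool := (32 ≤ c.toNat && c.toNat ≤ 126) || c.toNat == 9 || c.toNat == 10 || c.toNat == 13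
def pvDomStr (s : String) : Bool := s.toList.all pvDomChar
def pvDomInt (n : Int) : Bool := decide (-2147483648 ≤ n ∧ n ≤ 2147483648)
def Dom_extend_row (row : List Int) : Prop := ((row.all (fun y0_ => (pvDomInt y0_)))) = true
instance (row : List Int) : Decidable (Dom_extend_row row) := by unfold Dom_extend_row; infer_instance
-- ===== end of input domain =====

-- B builds the 5x row with a rolling per-tile state (normalize once, then increment each tile from the previous one) instead of recomputing (risk+n)%9 per cell; objective: alternative.

-- ===== PORT A =====
def extend_row (row : List Int) : String :=
  let extended_row : List String :=
    (PySem.List.pyRange 0 5 1).foldl (fun acc n =>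
      row.foldl (fun acc risk =>
        let new_risk := PySem.Int.mod (risk + n) 9
        let new_risk := if new_risk = 0 then 9 else new_risk
        acc ++ [PySem.Int.toStr new_risk]) acc) []
  PySem.Str.join "" extended_row

-- ===== PORT B =====
def extend_row_alt (row : List Int) : String :=
  let current := row.map (fun r => PySem.Int.mod (r - 1) 9 + 1)
  let st := (List.range 5).foldl (fun (st : List String × List Int) _ =>
      (st.1 ++ [PySem.Str.join "" (st.2.map PySem.Int.toStr)],
       st.2.map (fun c => PySem.Int.mod c 9 + 1)))
    ([], current)
  PySem.Str.join "" st.1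

-- ===== PRECONDITION & SPEC =====
def Spec_extend_row (row : List Int) (out : String) : Prop := out = extend_row_alt row
instance (row : List Int) (out : String) : Decidable (Spec_extend_row row out) := by unfold Spec_extend_row; infer_instance

-- ===== CLAIM =====
def Claim_equal_extend_row : Prop := ∀ (row : List Int), Dom_extend_row row → Spec_extend_row row (extend_row row)

-- ===== LEMMAS AND PROOFS =====
lemma join_empty_flatten (xs : List (List Char)) : PySem.Chars.join [] xs = xs.flatten := by
  induction xs with
  | nil => rfl
  | cons a t ih =>
    cases t with
    | nil => simp [PySem.Chars.join, List.intercalate]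
    | cons b u => simp_all [PySem.Chars.join, List.intercalate]

lemma join_tiles (a b c d e : List String) :
    PySem.Str.join "" (a ++ b ++ c ++ d ++ e) =
    PySem.Str.join "" [PySem.Str.join "" a, PySem.Str.join "" b, PySem.Str.join "" c,
      PySem.Str.join "" d, PySem.Str.join "" e] := by
  apply String.toList_inj.mp
  simp [PySem.Str.toList_join, join_empty_flatten]

lemma cell_eq (m : Int) :
    (if PySem.Int.mod m 9 = 0 then 9 else PySem.Int.mod m 9) = PySem.Int.mod (m-1) 9 + 1 := by
  rw [PySem.Int.mod_eq_emod_of_pos (by omega), PySem.Int.mod_eq_emod_of_pos (by omega)]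
  have h1 := Int.emod_nonneg m (b := 9) (by omega)
  have h2 := Int.emod_lt_of_pos m (b := 9) (by omega)
  have h3 := Int.emod_nonneg (m-1) (b := 9) (by omega)
  have h4 := Int.emod_lt_of_pos (m-1) (b := 9) (by omega)
  omega

lemma step_eq (m : Int) :
    PySem.Int.mod (PySem.Int.mod m 9 + 1) 9 + 1 = PySem.Int.mod (m + 1) 9 + 1 := by
  rw [PySem.Int.mod_eq_emod_of_pos (by omega), PySem.Int.mod_eq_emod_of_pos (by omega),
      PySem.Int.mod_eq_emod_of_pos (by omega)]
  omega

lemma seg_eq (row : List Int) (n : Int) :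
    row.map (fun risk => PySem.Int.toStr
      (if PySem.Int.mod (risk + n) 9 = 0 then 9 else PySem.Int.mod (risk + n) 9)) =
    (row.map (fun r => PySem.Int.mod (r + n - 1) 9 + 1)).map PySem.Int.toStr := by
  rw [List.map_map]
  exact List.map_congr_left (fun r _ => congrArg PySem.Int.toStr (cell_eq (r + n)))

theorem ab_eq (row : List Int) : extend_row row = extend_row_alt row := by
  unfold extend_row extend_row_alt
  have hr : PySem.List.pyRange 0 5 1 = [0, 1, 2, 3, 4] := by decide
  have hn : List.range 5 = [0, 1, 2, 3, 4] := by decide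
  rw [hr, hn]
  simp only [List.foldl_cons, List.foldl_nil,
    PySem.List.foldl_append_singleton_eq_map, List.nil_append]
  rw [seg_eq row 0, seg_eq row 1, seg_eq row 2, seg_eq row 3, seg_eq row 4, join_tiles]
  have h0 : row.map (fun r => PySem.Int.mod (r + 0 - 1) 9 + 1)
      = row.map (fun r => PySem.Int.mod (r - 1) 9 + 1) :=
    List.map_congr_left (fun r _ => by rw [show r + 0 - 1 = r - 1 by ring])
  have m1 : (row.map (fun r => PySem.Int.mod (r - 1) 9 + 1)).map
        (fun c => PySem.Int.mod c 9 + 1)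
      = row.map (fun r => PySem.Int.mod (r + 1 - 1) 9 + 1) := by
    rw [List.map_map]
    exact List.map_congr_left (fun r _ =>
      (step_eq (r - 1)).trans (by rw [show r - 1 + 1 = r + 1 - 1 by ring]))
  have m2 : (row.map (fun r => PySem.Int.mod (r + 1 - 1) 9 + 1)).map
        (fun c => PySem.Int.mod c 9 + 1)
      = row.map (fun r => PySem.Int.mod (r + 2 - 1) 9 + 1) := by
    rw [List.map_map]
    exact List.map_congr_left (fun r _ =>
      (step_eq (r + 1 - 1)).trans (by rw [show r + 1 - 1 + 1 = r + 2 - 1 by ring]))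
  have m3 : (row.map (fun r => PySem.Int.mod (r + 2 - 1) 9 + 1)).map
        (fun c => PySem.Int.mod c 9 + 1)
      = row.map (fun r => PySem.Int.mod (r + 3 - 1) 9 + 1) := by
    rw [List.map_map]
    exact List.map_congr_left (fun r _ =>
      (step_eq (r + 2 - 1)).trans (by rw [show r + 2 - 1 + 1 = r + 3 - 1 by ring]))
  have m4 : (row.map (fun r => PySem.Int.mod (r + 3 - 1) 9 + 1)).map
        (fun c => PySem.Int.mod c 9 + 1)
      = row.map (fun r => PySem.Int.mod (r + 4 - 1) 9 + 1) := by
    rw [List.map_map]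
    exact List.map_congr_left (fun r _ =>
      (step_eq (r + 3 - 1)).trans (by rw [show r + 3 - 1 + 1 = r + 4 - 1 by ring]))
  rw [h0, m1, m2, m3, m4]
  rfl

-- ===== VERDICT =====
theorem extend_row_spec : Claim_equal_extend_row := by
  intro row _
  unfold Spec_extend_row
  exact ab_eq row
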